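-- pv_equiv track=rewrite | github.com/mikarwacki/Static-site-generator | src/block_markdown.py | markdown_to_blokcs
-- ===== SOURCE A (Python) =====
-- def markdown_to_blokcs(markdown):
--     blocks = markdown.split("\n")
--     non_empty_blocks = []
--     temp_blocks = []
--     for block in blocks:
--         if len(block.strip()) > 0:
--             temp_blocks.append(block.strip())
--         else:
--             non_empty_blocks.append("\n".join(temp_blocks))
--             temp_blocks = []
--     if len(temp_blocks) > 0:
--         non_empty_blocks.append("\n".join(temp_blocks))
--     return non_empty_blocks
-- ===== SOURCE B (Python) =====
-- # Recursive split-on-first-blank-line decomposition instead of A's accumulate/flush state machine.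
-- def markdown_to_blokcs(markdown):
--     return _blocks(markdown.split("\n"))
--
-- def _blocks(lines):
--     i = 0
--     while i < len(lines) and lines[i].strip():
--         i += 1
--     block = "\n".join(l.strip() for l in lines[:i])
--     if i == len(lines):
--         return [block] if block else []
--     return [block] + _blocks(lines[i + 1:])
-- ===== Notes on version B (the rewrite author's own statement) =====
-- stated objective: alternative
-- what changed: Replaces A's single-pass accumulate-and-flush state machine (temp_blocks buffer flushed on each blank line, plus a trailing flush) with a recursive decomposition that repeatedly scans to the first blank line, emits the joined stripped prefix, and recurses on the remainder.
import Mathlib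
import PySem

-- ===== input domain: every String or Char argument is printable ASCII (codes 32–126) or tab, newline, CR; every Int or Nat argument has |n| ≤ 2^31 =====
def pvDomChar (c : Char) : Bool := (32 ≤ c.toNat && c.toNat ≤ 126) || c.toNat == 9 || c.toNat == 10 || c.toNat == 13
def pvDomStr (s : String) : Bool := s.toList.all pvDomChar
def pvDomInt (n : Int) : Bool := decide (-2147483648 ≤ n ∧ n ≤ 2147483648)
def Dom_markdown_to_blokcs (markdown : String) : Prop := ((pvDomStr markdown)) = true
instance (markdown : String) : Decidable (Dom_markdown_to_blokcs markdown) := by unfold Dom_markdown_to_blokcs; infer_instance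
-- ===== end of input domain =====

-- B replaces A's single-pass accumulate/flush state machine by a recursive
-- split-on-first-blank-line decomposition (objective: alternative, same cost).

-- ===== PORT A =====
-- loop body: accumulate stripped non-blank lines, flush the joined block on each blank line
def pvStepA (st : List String × List String) (block : String) : List String × List String :=
  if 0 < PySem.Str.len (PySem.Str.strip block) then (st.1, st.2 ++ [PySem.Str.strip block])
  else (st.1 ++ [PySem.Str.join "\n" st.2], [])

-- the trailing 'if len(temp_blocks) > 0' flush
def pvFinishA (st : List String × List String) : List String :=
  if 0 < st.2.length then st.1 ++ [PySem.Str.join "\n" st.2] else st.1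

def markdown_to_blokcs (markdown : String) : List String :=
  let blocks := (PySem.Str.split? markdown "\n").getD []   -- sep "\n" ≠ "": never none
  pvFinishA (blocks.foldl pvStepA ([], []))

-- ===== PORT B =====
-- truthiness of line.strip()
def pvNonblank (l : String) : Bool := PySem.Str.len (PySem.Str.strip l) != 0

-- _blocks: scan to the first blank line, emit the joined stripped prefix, recurse past it
def pvBlocksAlt (lines : List String) : List String :=
  let rest := lines.dropWhile pvNonblank
  let block := PySem.Str.join "\n" ((lines.takeWhile pvNonblank).map PySem.Str.strip)
  if hr : rest = [] then (if PySem.Str.len block != 0 then [block] else [])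
  else block :: pvBlocksAlt rest.tail
termination_by lines.length
decreasing_by
  have hle := List.length_dropWhile_le pvNonblank lines
  cases hrest : lines.dropWhile pvNonblank with
  | nil => exact absurd hrest hr
  | cons x rs => rw [hrest] at hle; simp at hle ⊢; omega

def markdown_to_blokcs_alt (markdown : String) : List String :=
  pvBlocksAlt ((PySem.Str.split? markdown "\n").getD [])

-- ===== PRECONDITION & SPEC =====
def Spec_markdown_to_blokcs (markdown : String) (out : List String) : Prop := out = markdown_to_blokcs_alt markdown
instance (markdown : String) (out : List String) : Decidable (Spec_markdown_to_blokcs markdown out) := by unfold Spec_markdown_to_blokcs; infer_instance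

-- ===== CLAIM (what is proved, stated in full; the proofs are below) =====
def Claim_equal_markdown_to_blokcs : Prop := ∀ (markdown : String), Dom_markdown_to_blokcs markdown → Spec_markdown_to_blokcs markdown (markdown_to_blokcs markdown)

-- ===== LEMMAS AND PROOFS =====

-- a "\n"-join of a list whose first element is non-empty is non-empty
lemma pvJoinLen (x : String) (xs : List String) (hx : PySem.Str.len x ≠ 0) :
    PySem.Str.len (PySem.Str.join "\n" (x :: xs)) ≠ 0 := by
  cases xs with
  | nil => simpa [PySem.Str.len, PySem.Str.join, PySem.Chars.join_singleton] using hx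
  | cons y ys => simp [PySem.Str.len, PySem.Str.join, PySem.Chars.join_cons_cons]; omega

-- B on a run of non-blank lines: one block, or nothing when the run is empty
lemma pvBlocksAlt_all (pre : List String) (h : ∀ b ∈ pre, pvNonblank b = true) :
    pvBlocksAlt pre =
      if 0 < pre.length then [PySem.Str.join "\n" (pre.map PySem.Str.strip)] else [] := by
  rw [pvBlocksAlt]
  simp only [List.dropWhile_eq_nil_iff.mpr h, List.takeWhile_eq_self_iff.mpr h, dite_true]
  cases pre with
  | nil => simp [PySem.Str.join, PySem.Str.len, PySem.Chars.join]
  | cons b t =>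
      have hb : PySem.Str.len (PySem.Str.strip b) ≠ 0 := by
        have := h b (by simp); simpa [pvNonblank] using this
      have hj := pvJoinLen (PySem.Str.strip b) (t.map PySem.Str.strip) hb
      simp only [List.map_cons, List.length_cons]
      rw [if_pos (by simpa using hj), if_pos (by omega)]

-- loop invariant: A's fold with pending stripped run `pre` = emitted ++ B on pre ++ rest
lemma pvMain (ls : List String) : ∀ (pre ne : List String), (∀ b ∈ pre, pvNonblank b = true) →
    pvFinishA (ls.foldl pvStepA (ne, pre.map PySem.Str.strip)) = ne ++ pvBlocksAlt (pre ++ ls) := by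
  induction ls with
  | nil =>
      intro pre ne h
      simp only [List.foldl_nil, List.append_nil, pvBlocksAlt_all pre h, pvFinishA]
      cases pre with
      | nil => simp
      | cons b t => simp
  | cons b bs ih =>
      intro pre ne h
      by_cases hb : pvNonblank b = true
      · have hx : PySem.Chars.strip b.toList ≠ [] := by simpa [pvNonblank] using hb
        have hstep : pvStepA (ne, pre.map PySem.Str.strip) b
            = (ne, (pre ++ [b]).map PySem.Str.strip) := by
          simp [pvStepA, PySem.Str.len, List.length_pos_iff, hx]
        have h' : ∀ x ∈ pre ++ [b], pvNonblank x = true := by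
          intro x hx'; rcases List.mem_append.mp hx' with hx' | hx'
          · exact h x hx'
          · simp at hx'; subst hx'; exact hb
        have := ih (pre ++ [b]) ne h'
        simpa [List.foldl_cons, hstep, List.append_assoc] using this
      · have hx : PySem.Chars.strip b.toList = [] := by simpa [pvNonblank] using hb
        have hstep : pvStepA (ne, pre.map PySem.Str.strip) b
            = (ne ++ [PySem.Str.join "\n" (pre.map PySem.Str.strip)], ([] : List String).map PySem.Str.strip) := by
          simp [pvStepA, PySem.Str.len, hx]
        have hB : pvBlocksAlt (pre ++ b :: bs)
            = PySem.Str.join "\n" (pre.map PySem.Str.strip) :: pvBlocksAlt bs := by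
          rw [pvBlocksAlt]
          simp only [List.dropWhile_append_of_pos h, List.takeWhile_append_of_pos h,
            List.dropWhile_cons_of_neg hb, List.takeWhile_cons_of_neg hb]
          simp
        have := ih [] (ne ++ [PySem.Str.join "\n" (pre.map PySem.Str.strip)]) (by simp)
        simp only [List.foldl_cons, hstep, this, hB]
        simp

-- ===== VERDICT (by name: the statement is the Claim_ definition above) =====
theorem markdown_to_blokcs_spec : Claim_equal_markdown_to_blokcs := by
  intro md _
  have h := pvMain ((PySem.Str.split? md "\n").getD []) [] [] (by simp)
  simpa [markdown_to_blokcs, markdown_to_blokcs_alt, Spec_markdown_to_blokcs] using h
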